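-- pv_equiv track=rewrite | github.com/brazilofmux/story | prototype/story_engine/core/compiler_stage_3.py | _enumerate_variable_bindings
-- ===== SOURCE A (Python) =====
-- from itertools import product
-- from typing import Dict, FrozenSet, Optional, Tuple, Union
--
-- def _enumerate_variable_bindings(
--     free_vars,
--     variable_types: Dict[str, str],
--     type_registry: Dict[str, str],
-- ):
--     """Typed Cartesian enumeration per sketch-02 S3P8.
--
--     For each free variable V with declared type T, enumerate only
--     over terms whose state-asserted type is T. If no term has the
--     required type, the product is empty and no bindings yield.
--
--     Deterministic: sorted order by variable name and by term."""
--     terms_by_type: Dict[str, list] = {}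
--     for term, type_name in type_registry.items():
--         terms_by_type.setdefault(type_name, []).append(term)
--     for v in terms_by_type:
--         terms_by_type[v].sort()
--
--     vars_list = sorted(free_vars)
--     lists_for_product: list = []
--     for v in vars_list:
--         required_type = variable_types.get(v)
--         if required_type is None:
--             # No type declared for this variable. Under sketch-02
--             # this should not happen (validation requires types) —
--             # but defensively, treat as zero-candidate to surface
--             # the misconfiguration as infeasibility rather than
--             # a crash.
--             lists_for_product.append([])
--         else:
--             lists_for_product.append(terms_by_type.get(required_type, []))
--
--     for values in product(*lists_for_product):
--         yield dict(zip(vars_list, values))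
-- ===== SOURCE B (Python) =====
-- def _enumerate_variable_bindings(
--     free_vars,
--     variable_types,
--     type_registry,
-- ):
--     """Per-variable filter of the registry plus a recursive enumerator
--     (no intermediate type->terms index, no itertools.product)."""
--     def candidates(v):
--         t = variable_types.get(v)
--         if t is None:
--             return []
--         return sorted(term for term, ty in type_registry.items() if ty == t)
--
--     pairs = [(v, candidates(v)) for v in sorted(free_vars)]
--
--     def rec(i, acc):
--         if i == len(pairs):
--             yield dict(acc)
--             return
--         v, cands = pairs[i]
--         for c in cands:
--             yield from rec(i + 1, acc + [(v, c)])
--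
--     yield from rec(0, [])
-- ===== Notes on version B (the rewrite author's own statement) =====
-- stated objective: alternative
-- what changed: B drops the type->terms grouping dict and itertools.product: it computes each variable's candidates by filtering+sorting the registry directly and enumerates bindings with a recursive generator that extends a partial binding list, yielding dict(acc) at the leaves.
import Mathlib
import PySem

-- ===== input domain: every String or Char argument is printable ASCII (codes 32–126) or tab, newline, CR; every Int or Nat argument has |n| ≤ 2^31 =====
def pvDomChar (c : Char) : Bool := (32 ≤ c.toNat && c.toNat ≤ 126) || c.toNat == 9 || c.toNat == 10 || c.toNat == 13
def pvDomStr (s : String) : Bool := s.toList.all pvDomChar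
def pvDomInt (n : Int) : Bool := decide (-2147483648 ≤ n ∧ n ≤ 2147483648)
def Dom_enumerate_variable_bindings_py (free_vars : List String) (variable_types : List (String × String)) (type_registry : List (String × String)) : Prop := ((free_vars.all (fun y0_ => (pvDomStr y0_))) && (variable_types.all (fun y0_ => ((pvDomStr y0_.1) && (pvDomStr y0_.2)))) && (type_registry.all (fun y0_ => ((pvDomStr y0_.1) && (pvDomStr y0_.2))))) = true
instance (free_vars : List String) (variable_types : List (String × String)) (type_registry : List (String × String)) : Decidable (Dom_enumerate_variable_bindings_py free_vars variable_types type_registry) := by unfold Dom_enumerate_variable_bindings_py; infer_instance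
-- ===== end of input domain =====

-- B replaces the grouping dict + itertools.product with per-variable registry filters and a
-- recursive enumerator over partial bindings (alternative decomposition, same results).

-- ===== PORT A =====
-- itertools.product over lists of strings (rightmost varies fastest)
def pvA_product : List (List String) → List (List String)
  | [] => [[]]
  | l :: rest => l.flatMap (fun x => (pvA_product rest).map (fun vs => x :: vs))

def enumerate_variable_bindings_py (free_vars : List String) (variable_types : List (String × String)) (type_registry : List (String × String)) : List (List (String × String)) :=
  -- terms_by_type.setdefault(type_name, []).append(term) ≡ modify type_name [] (· ++ [term])
  let terms_by_type0 := (PySem.Dict.ofList type_registry).items.foldl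
      (fun d (p : String × String) => d.modify p.2 [] (fun xs => xs ++ [p.1]))
      (PySem.Dict.empty : PySem.Dict String (List String))
  -- for v in terms_by_type: terms_by_type[v].sort()  (sort each value in place)
  let terms_by_type := PySem.Dict.mk (terms_by_type0.items.map
      (fun kv => (kv.1, PySem.List.sorted kv.2 (fun x => x) false)))
  let vars_list := PySem.List.sorted free_vars (fun x => x) false
  let lists_for_product := vars_list.map (fun v =>
      match (PySem.Dict.ofList variable_types).get? v with
      | none => []
      | some t => terms_by_type.getD t [])
  (pvA_product lists_for_product).map (fun values =>
      (PySem.Dict.ofList (vars_list.zip values)).items)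

-- ===== PORT B =====
def pvB_candidates (variable_types : List (String × String)) (type_registry : List (String × String)) (v : String) : List String :=
  match (PySem.Dict.ofList variable_types).get? v with
  | none => []
  | some t => PySem.List.sorted
      (((PySem.Dict.ofList type_registry).items.filter (fun p => p.2 == t)).map (fun p => p.1))
      (fun x => x) false

def pvB_rec : List (String × List String) → List (String × String) → List (List (String × String))
  | [], acc => [(PySem.Dict.ofList acc).items]
  | (v, cands) :: rest, acc => cands.flatMap (fun c => pvB_rec rest (acc ++ [(v, c)]))

def enumerate_variable_bindings_py_alt (free_vars : List String) (variable_types : List (String × String)) (type_registry : List (String × String)) : List (List (String × String)) :=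
  pvB_rec ((PySem.List.sorted free_vars (fun x => x) false).map
      (fun v => (v, pvB_candidates variable_types type_registry v))) []

-- ===== PRECONDITION & SPEC =====
def Spec_enumerate_variable_bindings_py (free_vars : List String) (variable_types : List (String × String)) (type_registry : List (String × String)) (out : List (List (String × String))) : Prop := out = enumerate_variable_bindings_py_alt free_vars variable_types type_registry
instance (free_vars : List String) (variable_types : List (String × String)) (type_registry : List (String × String)) (out : List (List (String × String))) : Decidable (Spec_enumerate_variable_bindings_py free_vars variable_types type_registry out) := by unfold Spec_enumerate_variable_bindings_py; infer_instance

-- ===== CLAIM (what is proved, stated in full; the proofs are below) =====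
def Claim_equal_enumerate_variable_bindings_py : Prop := ∀ (free_vars : List String) (variable_types : List (String × String)) (type_registry : List (String × String)), Dom_enumerate_variable_bindings_py free_vars variable_types type_registry → Spec_enumerate_variable_bindings_py free_vars variable_types type_registry (enumerate_variable_bindings_py free_vars variable_types type_registry)

-- ===== LEMMAS AND PROOFS =====

-- the grouping loop collects, per type t, the terms with that type, in registry order
theorem pv_grp_getD (l : List (String × String)) (d : PySem.Dict String (List String)) (t : String) :
    (l.foldl (fun d p => d.modify p.2 [] (fun xs => xs ++ [p.1])) d).getD t []
      = d.getD t [] ++ (l.filter (fun p => p.2 == t)).map (fun p => p.1) := by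
  induction l generalizing d with
  | nil => rw [List.foldl_nil, List.filter_nil, List.map_nil, List.append_nil]
  | cons p rest ih =>
      rw [List.foldl_cons, ih, PySem.Dict.getD_modify]
      by_cases h : t = p.2
      · rw [if_pos h, List.filter_cons_of_pos (by simp [h.symm]), List.map_cons, ← h,
          List.append_assoc, List.singleton_append]
      · rw [if_neg h, List.filter_cons_of_neg (by simp [beq_iff_eq]; exact fun hh => h hh.symm)]

-- sorting every value of an association list commutes with lookup
theorem pv_get?_map_sorted (l : List (String × List String)) (t : String) :
    PySem.Dict.get? (PySem.Dict.mk (l.map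
        (fun kv => (kv.1, PySem.List.sorted kv.2 (fun x => x) false)))) t
      = (PySem.Dict.get? (PySem.Dict.mk l) t).map
          (fun xs => PySem.List.sorted xs (fun x => x) false) := by
  induction l with
  | nil => rfl
  | cons kv rest ih =>
      rw [List.map_cons, PySem.Dict.get?_mk_cons, PySem.Dict.get?_mk_cons]
      by_cases h : kv.1 == t
      · rw [if_pos h, if_pos h, Option.map_some]
      · rw [if_neg h, if_neg h, ih]

-- structure eta for dicts
theorem pv_mk_items (d : PySem.Dict String (List String)) : PySem.Dict.mk d.items = d := rfl

-- A's candidate list for a variable equals B's filter-and-sort candidates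
theorem pv_cands_eq (variable_types type_registry : List (String × String)) (v : String) :
    (match (PySem.Dict.ofList variable_types).get? v with
      | none => []
      | some t =>
          (PySem.Dict.mk
            (((PySem.Dict.ofList type_registry).items.foldl
                (fun d (p : String × String) => d.modify p.2 [] (fun xs => xs ++ [p.1]))
                (PySem.Dict.empty : PySem.Dict String (List String))).items.map
              (fun kv => (kv.1, PySem.List.sorted kv.2 (fun x => x) false)))).getD t [])
      = pvB_candidates variable_types type_registry v := by
  unfold pvB_candidates
  cases (PySem.Dict.ofList variable_types).get? v with
  | none => rfl
  | some t =>
      simp only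
      rw [PySem.Dict.getD_eq_get?_getD, pv_get?_map_sorted, pv_mk_items]
      have h0 := pv_grp_getD ((PySem.Dict.ofList type_registry).items)
        (PySem.Dict.empty : PySem.Dict String (List String)) t
      rw [PySem.Dict.getD_empty, List.nil_append, PySem.Dict.getD_eq_get?_getD] at h0
      cases hg : PySem.Dict.get? ((PySem.Dict.ofList type_registry).items.foldl
          (fun d (p : String × String) => d.modify p.2 [] (fun xs => xs ++ [p.1]))
          (PySem.Dict.empty : PySem.Dict String (List String))) t with
      | none =>
          rw [hg, Option.getD_none] at h0
          rw [Option.map_none, Option.getD_none, ← h0]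
          rfl
      | some xs =>
          rw [hg, Option.getD_some] at h0
          rw [Option.map_some, Option.getD_some, h0]

-- B's recursion enumerates the product of the candidate lists, dict-ified against the variables
theorem pv_rec_eq_product (vars : List String) (cand : String → List String)
    (acc : List (String × String)) :
    pvB_rec (vars.map (fun v => (v, cand v))) acc
      = (pvA_product (vars.map cand)).map (fun values =>
          (PySem.Dict.ofList (acc ++ vars.zip values)).items) := by
  induction vars generalizing acc with
  | nil =>
      simp only [List.map_nil, pvB_rec, pvA_product, List.map_cons,
        List.zip_nil_left, List.append_nil]
  | cons v rest ih =>
      simp only [List.map_cons, pvB_rec, pvA_product, List.map_flatMap, List.map_map]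
      congr 1
      funext c
      rw [ih]
      refine List.map_congr_left (fun values _ => ?_)
      simp only [Function.comp_apply, List.zip_cons_cons, List.append_assoc,
        List.singleton_append]

-- ===== VERDICT (by name: the statement is the Claim_ definition above) =====
theorem enumerate_variable_bindings_py_spec : Claim_equal_enumerate_variable_bindings_py := by
  intro free_vars variable_types type_registry _
  simp only [Spec_enumerate_variable_bindings_py, enumerate_variable_bindings_py,
    enumerate_variable_bindings_py_alt]
  rw [pv_rec_eq_product (PySem.List.sorted free_vars (fun x => x) false)
    (pvB_candidates variable_types type_registry) []]
  simp only [List.nil_append]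
  congr 2
  refine List.map_congr_left (fun v _ => ?_)
  exact pv_cands_eq variable_types type_registry v
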